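-- pv_equiv track=rewrite | github.com/harjassand/AGI-Stack-Unchained | tools/v19_runs/level_attainment_report_v1.py | _max_level_achieved
-- ===== SOURCE A (Python) =====
-- LEVELS: tuple[tuple[str, str], ...] = (
--     ("L0", "M_SIGMA"),
--     ("L1", "M_SIGMA"),
--     ("L2", "M_PI"),
--     ("L3", "M_D"),
--     ("L4", "M_H"),
--     ("L5", "M_A"),
--     ("L6", "M_K"),
--     ("L7", "M_E"),
--     ("L8", "M_M"),
--     ("L9", "M_C"),
--     ("L10", "M_W"),
--     ("L11", "M_T"),
-- )
--
-- def _max_level_achieved(morphism_types_promoted: set[str]) -> tuple[str | None, list[str]]: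
--     achieved: list[str] = []
--     max_level: str | None = None
--     for idx, (level, _required) in enumerate(LEVELS):
--         required_prefix = {m for _lvl, m in LEVELS[: idx + 1]}
--         if required_prefix.issubset(morphism_types_promoted):
--             achieved.append(level)
--             max_level = level
--     return max_level, achieved
-- ===== SOURCE B (Python) =====
-- LEVELS: tuple[tuple[str, str], ...] = (
--     ("L0", "M_SIGMA"),
--     ("L1", "M_SIGMA"),
--     ("L2", "M_PI"),
--     ("L3", "M_D"),
--     ("L4", "M_H"),
--     ("L5", "M_A"),
--     ("L6", "M_K"),
--     ("L7", "M_E"),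
--     ("L8", "M_M"),
--     ("L9", "M_C"),
--     ("L10", "M_W"),
--     ("L11", "M_T"),
-- )
--
-- def _max_level_achieved(morphism_types_promoted: set[str]) -> tuple[str | None, list[str]]:
--     achieved: list[str] = []
--     for level, required in LEVELS:
--         if required not in morphism_types_promoted:
--             break
--         achieved.append(level)
--     max_level = achieved[-1] if achieved else None
--     return max_level, achieved
-- ===== Notes on version B (the rewrite author's own statement) =====
-- stated objective: simpler
-- what changed: B walks LEVELS once and breaks at the first required morphism missing from the set, taking max_level as the last achieved entry, instead of rebuilding a cumulative prefix set and running issubset at every level.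
import Mathlib
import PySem

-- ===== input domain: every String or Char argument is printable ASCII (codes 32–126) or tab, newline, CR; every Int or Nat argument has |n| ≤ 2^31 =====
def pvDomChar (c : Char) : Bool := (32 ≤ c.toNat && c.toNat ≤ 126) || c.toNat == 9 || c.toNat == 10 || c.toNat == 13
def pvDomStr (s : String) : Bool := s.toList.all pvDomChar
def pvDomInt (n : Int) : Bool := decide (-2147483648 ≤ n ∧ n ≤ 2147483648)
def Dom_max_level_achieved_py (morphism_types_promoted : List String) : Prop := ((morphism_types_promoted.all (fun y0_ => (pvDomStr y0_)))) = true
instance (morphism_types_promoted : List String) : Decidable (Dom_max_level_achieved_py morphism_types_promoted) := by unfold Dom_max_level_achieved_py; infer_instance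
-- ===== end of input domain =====

-- B replaces A's per-level cumulative prefix-set rebuild + issubset test with a single
-- walk that breaks at the first missing required morphism (objective: simpler).

def pvLEVELS : List (String × String) :=
  [("L0", "M_SIGMA"), ("L1", "M_SIGMA"), ("L2", "M_PI"), ("L3", "M_D"),
   ("L4", "M_H"), ("L5", "M_A"), ("L6", "M_K"), ("L7", "M_E"),
   ("L8", "M_M"), ("L9", "M_C"), ("L10", "M_W"), ("L11", "M_T")]

-- ===== PORT A =====
def max_level_achieved_py (morphism_types_promoted : List String) : Option String × List String :=
  let st :=
    (PySem.List.enumerate pvLEVELS).foldl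
      (fun (st : List String × Option String) ip =>
        let idx := ip.1
        let level := ip.2.1
        let required_prefix :=
          PySem.Set.ofList ((PySem.List.slice pvLEVELS none (some (idx + 1))).map (·.2))
        if PySem.Set.issubset required_prefix morphism_types_promoted then
          (st.1 ++ [level], some level)
        else st)
      ([], none)
  (st.2, st.1)

-- ===== PORT B =====
def pvWalk (morphism_types_promoted : List String) : List (String × String) → List String
  | [] => []
  | (level, required) :: rest =>
      if PySem.Set.contains morphism_types_promoted required then
        level :: pvWalk morphism_types_promoted rest
      else []

def max_level_achieved_py_alt (morphism_types_promoted : List String) : Option String × List String :=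
  let achieved := pvWalk morphism_types_promoted pvLEVELS
  (achieved.getLast?, achieved)

-- ===== PRECONDITION & SPEC =====
def Spec_max_level_achieved_py (morphism_types_promoted : List String) (out : Option String × List String) : Prop := out = max_level_achieved_py_alt morphism_types_promoted
instance (morphism_types_promoted : List String) (out : Option String × List String) : Decidable (Spec_max_level_achieved_py morphism_types_promoted out) := by unfold Spec_max_level_achieved_py; infer_instance

-- ===== CLAIM (what is proved, stated in full; the proofs are below) =====
def Claim_equal_max_level_achieved_py : Prop := ∀ (morphism_types_promoted : List String), Dom_max_level_achieved_py morphism_types_promoted → Spec_max_level_achieved_py morphism_types_promoted (max_level_achieved_py morphism_types_promoted)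

-- ===== LEMMAS AND PROOFS =====

-- ===== VERDICT (by name: the statement is the Claim_ definition above) =====
theorem max_level_achieved_py_spec : Claim_equal_max_level_achieved_py := by
  intro p _
  unfold Spec_max_level_achieved_py max_level_achieved_py max_level_achieved_py_alt
  by_cases h1 : ("M_SIGMA" ∈ p)
  case pos =>
    by_cases h2 : ("M_PI" ∈ p)
    case pos =>
      by_cases h3 : ("M_D" ∈ p)
      case pos =>
        by_cases h4 : ("M_H" ∈ p)
        case pos =>
          by_cases h5 : ("M_A" ∈ p)
          case pos =>
            by_cases h6 : ("M_K" ∈ p)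
            case pos =>
              by_cases h7 : ("M_E" ∈ p)
              case pos =>
                by_cases h8 : ("M_M" ∈ p)
                case pos =>
                  by_cases h9 : ("M_C" ∈ p)
                  case pos =>
                    by_cases h10 : ("M_W" ∈ p)
                    case pos =>
                      by_cases h11 : ("M_T" ∈ p)
                      case pos =>
                        simp [pvLEVELS, pvWalk, PySem.Set.issubset, PySem.Set.contains, PySem.Set.ofList,
                              PySem.List.enumerate, PySem.List.slice, h1, h2, h3, h4, h5, h6, h7, h8, h9, h10, h11]
                      case neg =>
                        simp [pvLEVELS, pvWalk, PySem.Set.issubset, PySem.Set.contains, PySem.Set.ofList,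
                              PySem.List.enumerate, PySem.List.slice, h1, h2, h3, h4, h5, h6, h7, h8, h9, h10, h11]
                    case neg =>
                      simp [pvLEVELS, pvWalk, PySem.Set.issubset, PySem.Set.contains, PySem.Set.ofList,
                            PySem.List.enumerate, PySem.List.slice, h1, h2, h3, h4, h5, h6, h7, h8, h9, h10]
                  case neg =>
                    simp [pvLEVELS, pvWalk, PySem.Set.issubset, PySem.Set.contains, PySem.Set.ofList,
                          PySem.List.enumerate, PySem.List.slice, h1, h2, h3, h4, h5, h6, h7, h8, h9]
                case neg =>
                  simp [pvLEVELS, pvWalk, PySem.Set.issubset, PySem.Set.contains, PySem.Set.ofList,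
                        PySem.List.enumerate, PySem.List.slice, h1, h2, h3, h4, h5, h6, h7, h8]
              case neg =>
                simp [pvLEVELS, pvWalk, PySem.Set.issubset, PySem.Set.contains, PySem.Set.ofList,
                      PySem.List.enumerate, PySem.List.slice, h1, h2, h3, h4, h5, h6, h7]
            case neg =>
              simp [pvLEVELS, pvWalk, PySem.Set.issubset, PySem.Set.contains, PySem.Set.ofList,
                    PySem.List.enumerate, PySem.List.slice, h1, h2, h3, h4, h5, h6]
          case neg =>
            simp [pvLEVELS, pvWalk, PySem.Set.issubset, PySem.Set.contains, PySem.Set.ofList,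
                  PySem.List.enumerate, PySem.List.slice, h1, h2, h3, h4, h5]
        case neg =>
          simp [pvLEVELS, pvWalk, PySem.Set.issubset, PySem.Set.contains, PySem.Set.ofList,
                PySem.List.enumerate, PySem.List.slice, h1, h2, h3, h4]
      case neg =>
        simp [pvLEVELS, pvWalk, PySem.Set.issubset, PySem.Set.contains, PySem.Set.ofList,
              PySem.List.enumerate, PySem.List.slice, h1, h2, h3]
    case neg =>
      simp [pvLEVELS, pvWalk, PySem.Set.issubset, PySem.Set.contains, PySem.Set.ofList,
            PySem.List.enumerate, PySem.List.slice, h1, h2]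
  case neg =>
    simp [pvLEVELS, pvWalk, PySem.Set.issubset, PySem.Set.contains, PySem.Set.ofList,
          PySem.List.enumerate, PySem.List.slice, h1]
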